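-- pv_equiv track=rewrite | github.com/Yu5k1/Deeplearning-Based-personalized-phototherapy-mask | data_processing.py | split_matrix_dynamically
-- ===== SOURCE A (Python) =====
-- def split_matrix_dynamically(matrix):
--     """
--     Split the input matrix into multiple rounds with non-repeating colors in each round
--     (each zone lights up only one color per round).
--     If a zone has multiple colors (R, G, B all set to 1), it will be split across multiple rounds
--     with priority R > G > B.
--     """
--     rounds = []
--
--     # Convert RGB info of each zone into a task queue
--     zone_tasks = []
--     for row in matrix:
--         zone, r, g, b = row
--         task = {
--             "zone": zone,
--             "colors": []
--         }
--         if r: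
--             task["colors"].append("R")
--         if g:
--             task["colors"].append("G")
--         if b:
--             task["colors"].append("B")
--         if task["colors"]:
--             zone_tasks.append(task)
--
--     # Schedule by rounds
--     while any(task["colors"] for task in zone_tasks):
--         current_round = []
--         for task in zone_tasks:
--             if task["colors"]:
--                 color = task["colors"].pop(0)  # Take one color per round (FIFO)
--                 if color == "R":
--                     current_round.append([task["zone"], 1, 0, 0])
--                 elif color == "G":
--                     current_round.append([task["zone"], 0, 1, 0])
--                 elif color == "B":
--                     current_round.append([task["zone"], 0, 0, 1])
--         if current_round:
--             rounds.append(current_round)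
--
--     return rounds
-- ===== SOURCE B (Python) =====
-- def split_matrix_dynamically(matrix):
--     """Single pass: distribute each zone's colors (priority R > G > B) into
--     rank-indexed round buckets by merging the row's one-hot vectors into rounds."""
--     rounds = []
--     for row in matrix:
--         zone, r, g, b = row
--         vecs = []
--         if r:
--             vecs.append([zone, 1, 0, 0])
--         if g:
--             vecs.append([zone, 0, 1, 0])
--         if b:
--             vecs.append([zone, 0, 0, 1])
--         for bucket, v in zip(rounds, vecs):
--             bucket.append(v)
--         rounds += [[v] for v in vecs[len(rounds):]]
--     return rounds
-- ===== Notes on version B (the rewrite author's own statement) =====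
-- stated objective: simpler
-- what changed: Replaces A's task-queue plus while-loop scheduler (which rescans every zone task once per round, popping colors FIFO) with a single pass over the matrix that merges each row's one-hot vectors into rank-indexed round buckets.
import Mathlib
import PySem

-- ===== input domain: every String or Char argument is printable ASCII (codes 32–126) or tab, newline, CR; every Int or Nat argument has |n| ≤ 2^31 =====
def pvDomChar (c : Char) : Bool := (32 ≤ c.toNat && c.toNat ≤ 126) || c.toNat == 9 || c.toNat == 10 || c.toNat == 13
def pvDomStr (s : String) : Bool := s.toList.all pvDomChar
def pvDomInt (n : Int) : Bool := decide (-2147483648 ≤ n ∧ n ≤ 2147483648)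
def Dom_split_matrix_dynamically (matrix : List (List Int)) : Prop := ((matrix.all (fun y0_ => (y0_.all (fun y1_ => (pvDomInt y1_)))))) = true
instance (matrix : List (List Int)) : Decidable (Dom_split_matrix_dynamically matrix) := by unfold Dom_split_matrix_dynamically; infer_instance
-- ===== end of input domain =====

-- B replaces A's while-loop round scheduler by a single pass merging each row's
-- one-hot vectors into rank-indexed round buckets (simpler decomposition, same cost).

-- ===== PORT A =====

-- 'if color == "R": … elif "G" … elif "B" …' (no branch fires for other strings)
def pvColorVec (z : Int) (c : String) : Option (List Int) :=
  if c = "R" then some [z, 1, 0, 0]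
  else if c = "G" then some [z, 0, 1, 0]
  else if c = "B" then some [z, 0, 0, 1]
  else none

-- the first for-loop: build zone_tasks (rows that raise on unpacking are outside Pre_)
def pvMkTasks (matrix : List (List Int)) : List (Int × List String) :=
  matrix.foldl (fun acc row =>
    match row with
    | [zone, r, g, b] =>
        let colors := (if r ≠ 0 then ["R"] else []) ++
                      (if g ≠ 0 then ["G"] else []) ++
                      (if b ≠ 0 then ["B"] else [])
        if colors ≠ [] then acc ++ [(zone, colors)] else acc
    | _ => acc) []

-- one body of the while loop: the inner for over zone_tasks, popping colors[0]
-- and collecting current_round; returns (current_round, updated zone_tasks)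
def pvStep : List (Int × List String) → List (List Int) × List (Int × List String)
  | [] => ([], [])
  | (z, []) :: ts =>
      let p := pvStep ts
      (p.1, (z, []) :: p.2)
  | (z, c :: cs) :: ts =>
      let p := pvStep ts
      (match pvColorVec z c with
       | some v => v :: p.1
       | none => p.1, (z, cs) :: p.2)

def pvWeight (ts : List (Int × List String)) : Nat := (ts.map (fun t => t.2.length)).sum

theorem pvStep_weight_le (ts : List (Int × List String)) :
    pvWeight (pvStep ts).2 ≤ pvWeight ts := by
  induction ts with
  | nil => simp [pvStep]
  | cons t ts ih =>
      obtain ⟨z, cs⟩ := t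
      cases cs <;> simp [pvStep, pvWeight] at ih ⊢ <;> omega

theorem pvStep_snd_weight (ts : List (Int × List String)) :
    (ts.any (fun t => !t.2.isEmpty)) = true → pvWeight (pvStep ts).2 < pvWeight ts := by
  induction ts with
  | nil => simp
  | cons t ts ih =>
      obtain ⟨z, cs⟩ := t
      cases cs with
      | nil =>
          intro hh
          have h' : (ts.any (fun t => !t.2.isEmpty)) = true := by simpa using hh
          have := ih h'
          simp [pvStep, pvWeight] at this ⊢
          omega
      | cons c cs =>
          intro _
          have := pvStep_weight_le ts
          simp [pvStep, pvWeight] at this ⊢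
          omega

-- the while loop: 'while any(task["colors"] …): … if current_round: rounds.append(…)'
def pvLoop (ts : List (Int × List String)) : List (List (List Int)) :=
  if h : (ts.any (fun t => !t.2.isEmpty)) = true then
    let p := pvStep ts
    let rest := pvLoop p.2
    if p.1 = [] then rest else p.1 :: rest
  else []
termination_by pvWeight ts
decreasing_by exact pvStep_snd_weight ts h

def split_matrix_dynamically (matrix : List (List Int)) : List (List (List Int)) :=
  pvLoop (pvMkTasks matrix)

-- ===== PORT B =====

-- one row-merge of Source B: the zip loop 'bucket.append(v)' updates the first
-- min(len) buckets, the untouched tail of rounds stays, then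
-- 'rounds += [[v] for v in vecs[len(rounds):]]' (nonnegative start ⇒ drop)
def pvMerge (rounds : List (List (List Int))) (vecs : List (List Int)) : List (List (List Int)) :=
  (rounds.zip vecs).map (fun p => p.1 ++ [p.2]) ++ rounds.drop vecs.length
    ++ (vecs.drop rounds.length).map (fun v => [v])

-- the per-row vecs list built by the three ifs of Source B
def pvVecsOf (row : List Int) : List (List Int) :=
  match row with
  | [zone, r, g, b] =>
      (if r ≠ 0 then [[zone, 1, 0, 0]] else []) ++
      (if g ≠ 0 then [[zone, 0, 1, 0]] else []) ++
      (if b ≠ 0 then [[zone, 0, 0, 1]] else [])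
  | _ => []

def split_matrix_dynamically_alt (matrix : List (List Int)) : List (List (List Int)) :=
  matrix.foldl (fun rounds row => pvMerge rounds (pvVecsOf row)) []

-- ===== PRECONDITION & SPEC =====
-- Pre_ excludes exactly the rows on which the Python A raises ValueError while
-- unpacking 'zone, r, g, b = row' (rows whose length is not 4); B raises there too.
def Pre_split_matrix_dynamically (matrix : List (List Int)) : Prop :=
  ∀ row ∈ matrix, row.length = 4
instance (matrix : List (List Int)) : Decidable (Pre_split_matrix_dynamically matrix) := by
  unfold Pre_split_matrix_dynamically; infer_instance

def pvWitness_split_matrix_dynamically : List (List Int) := [[1, 1, 0, 1], [2, 0, 1, 0], [3, 1, 1, 1]]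

def Spec_split_matrix_dynamically (matrix : List (List Int)) (out : List (List (List Int))) : Prop := out = split_matrix_dynamically_alt matrix
instance (matrix : List (List Int)) (out : List (List (List Int))) : Decidable (Spec_split_matrix_dynamically matrix out) := by unfold Spec_split_matrix_dynamically; infer_instance

-- ===== CLAIM (what is proved, stated in full; the proofs are below) =====
def Claim_equal_split_matrix_dynamically : Prop := ∀ (matrix : List (List Int)), Dom_split_matrix_dynamically matrix → Pre_split_matrix_dynamically matrix → Spec_split_matrix_dynamically matrix (split_matrix_dynamically matrix)

-- ===== LEMMAS AND PROOFS =====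

-- the vec list a task contributes over its lifetime
def pvTaskVecs (t : Int × List String) : List (List Int) :=
  t.2.filterMap (pvColorVec t.1)

-- tasks whose colors all lie in {R,G,B} (invariant of A's queue)
def pvGood (ts : List (Int × List String)) : Prop :=
  ∀ t ∈ ts, ∀ c ∈ t.2, c = "R" ∨ c = "G" ∨ c = "B"

theorem pvMerge_nil_right (rs : List (List (List Int))) : pvMerge rs [] = rs := by
  simp [pvMerge]

theorem pvMerge_nil_cons (v : List Int) (vs : List (List Int)) :
    pvMerge [] (v :: vs) = [v] :: pvMerge [] vs := by
  simp [pvMerge]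

theorem pvMerge_cons_cons (r : List (List Int)) (rs : List (List (List Int)))
    (v : List Int) (vs : List (List Int)) :
    pvMerge (r :: rs) (v :: vs) = (r ++ [v]) :: pvMerge rs vs := by
  simp [pvMerge]

-- mergeV on a cons accumulator: first bucket gets the head of vs (if any)
theorem pvMerge_cons (r : List (List Int)) (rs : List (List (List Int))) (vs : List (List Int)) :
    pvMerge (r :: rs) vs = (r ++ vs.head?.toList) :: pvMerge rs vs.tail := by
  cases vs with
  | nil => simp [pvMerge_nil_right]
  | cons v vs => simp [pvMerge_cons_cons]

-- folding merges into a cons accumulator splits off the heads column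
theorem pvFold_merge_cons (vss : List (List (List Int))) (r : List (List Int))
    (rs : List (List (List Int))) :
    vss.foldl pvMerge (r :: rs)
      = (r ++ vss.filterMap List.head?) :: (vss.map List.tail).foldl pvMerge rs := by
  induction vss generalizing r rs with
  | nil => simp
  | cons vs vss ih =>
      simp only [List.foldl_cons, List.map_cons, List.filterMap_cons]
      rw [pvMerge_cons, ih]
      cases hv : vs.head? with
      | none =>
          cases vs with
          | nil => simp
          | cons v vs => simp at hv
      | some v =>
          cases vs with
          | nil => simp at hv
          | cons v' vs => simp at hv; simp [hv]

-- folding merges into [] unrolls one round when some list is nonempty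
theorem pvFold_merge_nil (vss : List (List (List Int)))
    (hne : ∃ vs ∈ vss, vs ≠ []) :
    vss.foldl pvMerge []
      = vss.filterMap List.head? :: (vss.map List.tail).foldl pvMerge [] := by
  induction vss with
  | nil => simp at hne
  | cons vs vss ih =>
      cases vs with
      | nil =>
          have hne' : ∃ vs ∈ vss, vs ≠ [] := by
            obtain ⟨w, hw, hwne⟩ := hne
            rcases List.mem_cons.mp hw with h | h
            · exact absurd h hwne
            · exact ⟨w, h, hwne⟩
          simp only [List.foldl_cons, List.map_cons, List.filterMap_cons, pvMerge_nil_right]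
          simpa using ih hne'
      | cons v vs =>
          simp only [List.foldl_cons, List.map_cons, List.filterMap_cons,
            pvMerge_nil_cons, List.head?_cons, List.tail_cons]
          rw [pvFold_merge_cons]
          simp

theorem pvStep_eq (ts : List (Int × List String)) :
    pvStep ts = (ts.filterMap (fun t => t.2.head?.bind (pvColorVec t.1)),
                 ts.map (fun t => (t.1, t.2.tail))) := by
  induction ts with
  | nil => simp [pvStep]
  | cons t ts ih =>
      obtain ⟨z, cs⟩ := t
      cases cs with
      | nil => simp [pvStep, ih]
      | cons c cs =>
          simp only [pvStep, ih, List.filterMap_cons, List.map_cons, List.head?_cons,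
            List.tail_cons]
          cases hv : pvColorVec z c <;> simp [hv]

theorem pvGood_tails (ts : List (Int × List String)) (h : pvGood ts) :
    pvGood (ts.map (fun t => (t.1, t.2.tail))) := by
  intro t ht c hc
  simp only [List.mem_map] at ht
  obtain ⟨u, hu, rfl⟩ := ht
  exact h u hu c (List.mem_of_mem_tail hc)

theorem pvColorVec_some (z : Int) (c : String) (h : c = "R" ∨ c = "G" ∨ c = "B") :
    ∃ v, pvColorVec z c = some v := by
  rcases h with h | h | h
  · exact ⟨[z, 1, 0, 0], by simp [pvColorVec, h]⟩
  · exact ⟨[z, 0, 1, 0], by simp [pvColorVec, h]⟩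
  · exact ⟨[z, 0, 0, 1], by simp [pvColorVec, h]⟩

theorem pvTaskVecs_tail (ts : List (Int × List String)) (h : pvGood ts) :
    (ts.map (fun t => (t.1, t.2.tail))).map pvTaskVecs = (ts.map pvTaskVecs).map List.tail := by
  induction ts with
  | nil => simp
  | cons t ts ih =>
      obtain ⟨z, cs⟩ := t
      have hts : pvGood ts := fun u hu => h u (List.mem_cons_of_mem _ hu)
      have hrec := ih hts
      cases cs with
      | nil => simp only [List.map_cons] at hrec ⊢; rw [hrec]; simp [pvTaskVecs]
      | cons c cs =>
          have hc : c = "R" ∨ c = "G" ∨ c = "B" :=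
            h (z, c :: cs) (List.mem_cons_self) c (List.mem_cons_self)
          obtain ⟨v, hv⟩ := pvColorVec_some z c hc
          simp only [List.map_cons] at hrec ⊢
          rw [hrec]
          simp [pvTaskVecs, hv]

theorem pvTaskVecs_head (ts : List (Int × List String)) (h : pvGood ts) :
    ts.filterMap (fun t => t.2.head?.bind (pvColorVec t.1))
      = (ts.map pvTaskVecs).filterMap List.head? := by
  induction ts with
  | nil => simp
  | cons t ts ih =>
      obtain ⟨z, cs⟩ := t
      have hts : pvGood ts := fun u hu => h u (List.mem_cons_of_mem _ hu)
      have hrec := ih hts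
      cases cs with
      | nil => simp [pvTaskVecs, hrec]
      | cons c cs =>
          have hc : c = "R" ∨ c = "G" ∨ c = "B" :=
            h (z, c :: cs) (List.mem_cons_self) c (List.mem_cons_self)
          obtain ⟨v, hv⟩ := pvColorVec_some z c hc
          simp [pvTaskVecs, hv, hrec]

theorem pvAny_iff (ts : List (Int × List String)) (h : pvGood ts) :
    (ts.any (fun t => !t.2.isEmpty)) = true ↔ ∃ vs ∈ ts.map pvTaskVecs, vs ≠ [] := by
  simp only [List.any_eq_true, List.mem_map]
  constructor
  · rintro ⟨t, ht, hne⟩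
    obtain ⟨z, cs⟩ := t
    cases cs with
    | nil => simp at hne
    | cons c cs =>
        refine ⟨pvTaskVecs (z, c :: cs), ⟨(z, c :: cs), ht, rfl⟩, ?_⟩
        have hc : c = "R" ∨ c = "G" ∨ c = "B" := h (z, c :: cs) ht c (List.mem_cons_self)
        obtain ⟨v, hv⟩ := pvColorVec_some z c hc
        simp [pvTaskVecs, hv]
  · rintro ⟨vs, ⟨t, ht, rfl⟩, hne⟩
    obtain ⟨z, cs⟩ := t
    cases cs with
    | nil => simp [pvTaskVecs] at hne
    | cons c cs => exact ⟨(z, c :: cs), ht, by simp⟩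

-- heads of a good, somewhere-nonempty task list form a nonempty round
theorem pvHeads_ne (ts : List (Int × List String)) (h : pvGood ts)
    (hany : (ts.any (fun t => !t.2.isEmpty)) = true) :
    ts.filterMap (fun t => t.2.head?.bind (pvColorVec t.1)) ≠ [] := by
  simp only [List.any_eq_true] at hany
  obtain ⟨t, ht, hne⟩ := hany
  obtain ⟨z, cs⟩ := t
  cases cs with
  | nil => simp at hne
  | cons c cs =>
      have hc : c = "R" ∨ c = "G" ∨ c = "B" := h (z, c :: cs) ht c (List.mem_cons_self)
      obtain ⟨v, hv⟩ := pvColorVec_some z c hc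
      intro hnil
      have hmem : v ∈ ts.filterMap (fun t => t.2.head?.bind (pvColorVec t.1)) :=
        List.mem_filterMap.mpr ⟨(z, c :: cs), ht, by simp [hv]⟩
      rw [hnil] at hmem
      simp at hmem

-- merging a list of empty vec lists is a no-op
theorem pvFold_merge_all_nil (vss : List (List (List Int)))
    (h : ∀ vs ∈ vss, vs = []) : vss.foldl pvMerge [] = [] := by
  induction vss with
  | nil => simp
  | cons vs vss ih =>
      rw [List.foldl_cons, h vs List.mem_cons_self, pvMerge_nil_right]
      exact ih (fun u hu => h u (List.mem_cons_of_mem _ hu))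

-- A's while loop computes the column-wise fold of merges over the task vec lists
theorem pvLoop_eq_fold (ts : List (Int × List String)) (h : pvGood ts) :
    pvLoop ts = (ts.map pvTaskVecs).foldl pvMerge [] := by
  induction hw : pvWeight ts using Nat.strong_induction_on generalizing ts with
  | _ n ih =>
    subst hw
    rw [pvLoop]
    by_cases hany : (ts.any (fun t => !t.2.isEmpty)) = true
    · rw [dif_pos hany, pvStep_eq]
      have hlt := pvStep_snd_weight ts hany
      rw [pvStep_eq] at hlt
      have hrec := ih _ hlt (ts.map (fun t => (t.1, t.2.tail))) (pvGood_tails ts h) rfl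
      simp only [hrec]
      have hne := pvHeads_ne ts h hany
      rw [if_neg hne, pvTaskVecs_head ts h, pvTaskVecs_tail ts h]
      exact (pvFold_merge_nil _ ((pvAny_iff ts h).mp hany)).symm
    · rw [dif_neg hany]
      have hall : ∀ vs ∈ ts.map pvTaskVecs, vs = [] := by
        intro vs hvs
        by_contra hne
        exact hany ((pvAny_iff ts h).mpr ⟨vs, hvs, hne⟩)
      exact (pvFold_merge_all_nil _ hall).symm
-- the zero-or-one task a single row contributes
def pvRowTask (row : List Int) : List (Int × List String) :=
  match row with
  | [zone, r, g, b] =>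
      let colors := (if r ≠ 0 then ["R"] else []) ++
                    (if g ≠ 0 then ["G"] else []) ++
                    (if b ≠ 0 then ["B"] else [])
      if colors ≠ [] then [(zone, colors)] else []
  | _ => []

theorem pvMkTasks_foldl_acc (matrix : List (List Int)) (acc : List (Int × List String)) :
    matrix.foldl (fun acc row =>
      match row with
      | [zone, r, g, b] =>
          let colors := (if r ≠ 0 then ["R"] else []) ++
                        (if g ≠ 0 then ["G"] else []) ++
                        (if b ≠ 0 then ["B"] else [])
          if colors ≠ [] then acc ++ [(zone, colors)] else acc
      | _ => acc) acc = acc ++ matrix.flatMap pvRowTask := by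
  induction matrix generalizing acc with
  | nil => simp
  | cons row m ih =>
      rw [List.foldl_cons, List.flatMap_cons]
      have hstep : ∀ (a : List (Int × List String)),
          (match row with
           | [zone, r, g, b] =>
               let colors := (if r ≠ 0 then ["R"] else []) ++
                             (if g ≠ 0 then ["G"] else []) ++
                             (if b ≠ 0 then ["B"] else [])
               if colors ≠ [] then a ++ [(zone, colors)] else a
           | _ => a) = a ++ pvRowTask row := by
        intro a
        rcases row with _ | ⟨z, _ | ⟨r, _ | ⟨g, _ | ⟨b, _ | ⟨x, rest⟩⟩⟩⟩⟩ <;>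
          simp [pvRowTask] <;> split_ifs <;> simp
      rw [hstep, ih, List.append_assoc]

theorem pvMkTasks_eq (matrix : List (List Int)) :
    pvMkTasks matrix = matrix.flatMap pvRowTask := by
  unfold pvMkTasks
  simpa using pvMkTasks_foldl_acc matrix []

theorem pvRow_merge (rs : List (List (List Int))) (row : List Int) :
    ((pvRowTask row).map pvTaskVecs).foldl pvMerge rs = pvMerge rs (pvVecsOf row) := by
  rcases row with _ | ⟨z, _ | ⟨r, _ | ⟨g, _ | ⟨b, _ | ⟨x, rest⟩⟩⟩⟩⟩ <;>
    simp only [pvRowTask, pvVecsOf] <;> try simp [pvMerge_nil_right]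
  split_ifs with h1 h2 h3 <;>
    simp_all [pvTaskVecs, pvColorVec, pvMerge_nil_right]

-- bridge: folding merges over A's task vec lists equals B's fold over the matrix
theorem pvBridge (matrix : List (List Int)) :
    ((pvMkTasks matrix).map pvTaskVecs).foldl pvMerge []
      = matrix.foldl (fun rounds row => pvMerge rounds (pvVecsOf row)) [] := by
  rw [pvMkTasks_eq]
  suffices h : ∀ rs, ((matrix.flatMap pvRowTask).map pvTaskVecs).foldl pvMerge rs
      = matrix.foldl (fun rounds row => pvMerge rounds (pvVecsOf row)) rs from h []
  induction matrix with
  | nil => simp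
  | cons row m ih =>
      intro rs
      rw [List.flatMap_cons, List.map_append, List.foldl_append, pvRow_merge, List.foldl_cons, ih]

theorem pvMkTasks_good (matrix : List (List Int)) : pvGood (pvMkTasks matrix) := by
  rw [pvMkTasks_eq]
  intro t ht c hc
  rw [List.mem_flatMap] at ht
  obtain ⟨row, _, ht⟩ := ht
  rcases row with _ | ⟨z, _ | ⟨r, _ | ⟨g, _ | ⟨b, _ | ⟨x, rest⟩⟩⟩⟩⟩ <;>
    unfold pvRowTask at ht <;> simp at ht <;> simp_all <;> tauto

-- ===== VERDICT (by name: the statement is the Claim_ definition above) =====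
theorem split_matrix_dynamically_spec : Claim_equal_split_matrix_dynamically := by
  intro matrix _ _
  unfold Spec_split_matrix_dynamically split_matrix_dynamically split_matrix_dynamically_alt
  rw [pvLoop_eq_fold _ (pvMkTasks_good matrix), pvBridge]
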